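-- pv_equiv track=rewrite | github.com/JoanChirinos/PClassic | 2017s/problem3.py | cardinal_confusion
-- ===== SOURCE A (Python) =====
-- def cardinal_confusion(inp):
--     s = 0
--     for a in range(1, inp + 1):
--         for b in range(1, inp + 1):
--             for c in range(1, inp + 1):
--                 for d in range(1, inp + 1):
--                     if (a * b - c * d == 1):
--                         s += 1
--     return s
-- ===== SOURCE B (Python) =====
-- def cardinal_confusion(inp):
--     counts = {}
--     for a in range(1, inp + 1):
--         for b in range(1, inp + 1):
--             p = a * b
--             counts[p] = counts.get(p, 0) + 1
--     return sum(v * counts.get(k - 1, 0) for k, v in counts.items())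
-- ===== Notes on version B (the rewrite author's own statement) =====
-- stated objective: faster
-- what changed: Replaces the O(n^4) quadruple loop with an O(n^2) product-frequency table: count each product a*b once, then sum count[k]*count[k-1] over the table.
import Mathlib
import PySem

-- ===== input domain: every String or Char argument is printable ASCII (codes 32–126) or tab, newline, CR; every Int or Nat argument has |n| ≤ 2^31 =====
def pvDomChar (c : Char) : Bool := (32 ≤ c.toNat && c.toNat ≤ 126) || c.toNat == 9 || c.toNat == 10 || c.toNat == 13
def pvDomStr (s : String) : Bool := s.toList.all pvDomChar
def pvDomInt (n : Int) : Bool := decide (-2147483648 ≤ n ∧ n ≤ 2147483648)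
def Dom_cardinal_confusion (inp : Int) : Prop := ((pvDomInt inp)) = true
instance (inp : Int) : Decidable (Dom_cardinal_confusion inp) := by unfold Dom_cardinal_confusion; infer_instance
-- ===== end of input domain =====

-- B replaces A's O(n^4) quadruple loop by an O(n^2) product-frequency table (count each product a*b, then sum count[k]*count[k-1]).

-- ===== PORT A =====
def cardinal_confusion (inp : Int) : Int :=
  (PySem.List.pyRange 1 (inp + 1) 1).foldl (fun s a =>
    (PySem.List.pyRange 1 (inp + 1) 1).foldl (fun s b =>
      (PySem.List.pyRange 1 (inp + 1) 1).foldl (fun s c =>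
        (PySem.List.pyRange 1 (inp + 1) 1).foldl (fun s d =>
          if a * b - c * d == 1 then s + 1 else s) s) s) s) 0

-- ===== PORT B =====
def cardinal_confusion_alt (inp : Int) : Int :=
  let counts : PySem.Dict Int Int :=
    (PySem.List.pyRange 1 (inp + 1) 1).foldl (fun d a =>
      (PySem.List.pyRange 1 (inp + 1) 1).foldl (fun d b =>
        let p := a * b
        d.insert p (d.getD p 0 + 1)) d) PySem.Dict.empty
  (counts.items.map (fun kv => kv.2 * counts.getD (kv.1 - 1) 0)).sum

-- ===== PRECONDITION & SPEC =====
def Spec_cardinal_confusion (inp : Int) (out : Int) : Prop := out = cardinal_confusion_alt inp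
instance (inp : Int) (out : Int) : Decidable (Spec_cardinal_confusion inp out) := by unfold Spec_cardinal_confusion; infer_instance

-- ===== CLAIM (what is proved, stated in full; the proofs are below) =====
def Claim_equal_cardinal_confusion : Prop := ∀ (inp : Int), Dom_cardinal_confusion inp → Spec_cardinal_confusion inp (cardinal_confusion inp)

-- ===== LEMMAS AND PROOFS =====

-- sum of a flatMap of Int lists (stated for List.sum; not in Mathlib/PySem)
theorem pv_sum_flatMap (l : List Int) (f : Int → List Int) :
    (l.flatMap f).sum = (l.map (fun x => (f x).sum)).sum := by
  induction l with
  | nil => simp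
  | cons x xs ih => simp [List.flatMap_cons, List.sum_append, ih]

-- picking the single matching key out of a nodup list
theorem pv_sum_single (S : List Int) (q : Int) (g : Int → Int)
    (hnd : S.Nodup) (hq : q ∈ S) :
    (S.map (fun k => if k = q then g k else 0)).sum = g q := by
  revert hnd hq
  induction S with
  | nil => intro _ hq; simp at hq
  | cons k S' ih =>
    intro hnd hq
    rcases List.nodup_cons.mp hnd with ⟨hk, hnd'⟩
    rcases List.mem_cons.mp hq with h | h
    · subst h
      have hz : (S'.map (fun x => if x = q then g x else 0)).sum = 0 := by
        apply List.sum_eq_zero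
        intro y hy
        rcases List.mem_map.mp hy with ⟨x, hx, rfl⟩
        have hxk : x ≠ q := fun h => hk (h ▸ hx)
        simp [hxk]
      simp [hz]
    · have hkq : k ≠ q := fun e => hk (e ▸ h)
      simp only [List.map_cons, List.sum_cons, if_neg hkq, zero_add]
      exact ih hnd' h

-- grouping a sum over a list by its distinct values
theorem pv_group_sum (S Q : List Int) (g : Int → Int)
    (hnd : S.Nodup) (hsub : ∀ x ∈ Q, x ∈ S) :
    (Q.map g).sum = (S.map (fun k => (Q.count k : Int) * g k)).sum := by
  induction Q with
  | nil => simp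
  | cons q Q' ih =>
    have hq : q ∈ S := hsub q List.mem_cons_self
    have hsub' : ∀ x ∈ Q', x ∈ S := fun x hx => hsub x (List.mem_cons_of_mem _ hx)
    have ih' := ih hsub'
    have hterm : ∀ k : Int, ((q :: Q').count k : Int) * g k
        = (Q'.count k : Int) * g k + (if k = q then g k else 0) := by
      intro k
      rcases eq_or_ne k q with h | h
      · subst h; simp [List.count_cons_self]; ring
      · simp [List.count_cons_of_ne, h.symm, h]
    calc ((q :: Q').map g).sum = g q + (Q'.map g).sum := by simp
      _ = (S.map (fun k => (Q'.count k : Int) * g k)).sum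
            + (S.map (fun k => if k = q then g k else 0)).sum := by
            rw [ih', pv_sum_single S q g hnd hq]; ring
      _ = (S.map (fun k => ((q :: Q').count k : Int) * g k)).sum := by
            rw [← PySem.List.sum_map_add_int]
            congr 1
            exact (List.map_congr_left (fun k _ => (hterm k).symm))

-- the c,d double count of products hitting p - 1, as a count in the product list
theorem pv_inner_count (R : List Int) (p : Int) :
    (R.map (fun c => ((R.countP (fun d => p - c * d == 1) : Nat) : Int))).sum
      = (((R.flatMap (fun a => R.map (fun b => a * b))).count (p - 1) : Nat) : Int) := by
  have h1 : (R.flatMap (fun a => R.map (fun b => a * b))).count (p - 1)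
      = (R.map (fun c => R.countP (fun d => c * d == p - 1))).sum := by
    simp [List.count, List.countP_flatMap, List.countP_map, Function.comp_def]
  rw [h1, Nat.cast_list_sum, List.map_map]
  congr 1
  apply List.map_congr_left
  intro c _
  have hfe : (fun d => p - c * d == 1) = (fun d : Int => c * d == p - 1) := by
    funext d
    rw [Bool.eq_iff_iff]
    simp only [beq_iff_eq]
    omega
  simp [hfe]

-- a nested a,b sum is a sum over the flattened product list
theorem pv_nested_sum (R : List Int) (h : Int → Int) :
    (R.map (fun a => (R.map (fun b => h (a * b))).sum)).sum
      = (((R.flatMap (fun a => R.map (fun b => a * b))).map h)).sum := by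
  rw [List.map_flatMap, pv_sum_flatMap]
  simp [List.map_map, Function.comp_def]

-- B's nested dict-building loop is the counter of the product list
theorem pv_counts (R : List Int) :
    R.foldl (fun d a => R.foldl (fun d b =>
        let p := a * b
        d.insert p (d.getD p 0 + 1)) d) PySem.Dict.empty
      = PySem.Dict.counter (R.flatMap (fun a => R.map (fun b => a * b))) := by
  rw [← PySem.Dict.foldl_insert_getD_add_one_eq_counter, List.foldl_flatMap]
  simp only [List.foldl_map]

-- A's quadruple loop as a triple sum over a count
theorem pv_aside (R : List Int) :
    R.foldl (fun s a => R.foldl (fun s b => R.foldl (fun s c => R.foldl (fun s d =>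
      if a * b - c * d == 1 then s + 1 else s) s) s) s) (0 : Int)
    = (R.map (fun a => (R.map (fun b => (R.map (fun c =>
        ((R.countP (fun d => a * b - c * d == 1) : Nat) : Int))).sum)).sum)).sum := by
  simp only [PySem.List.foldl_count_if, PySem.List.foldl_add, zero_add]

theorem cardinal_confusion_eq (inp : Int) :
    cardinal_confusion inp = cardinal_confusion_alt inp := by
  unfold cardinal_confusion cardinal_confusion_alt
  dsimp only
  set R := PySem.List.pyRange 1 (inp + 1) 1 with hR
  set P := R.flatMap (fun a => R.map (fun b => a * b)) with hP
  rw [pv_aside R, pv_counts R, PySem.Dict.items_counter]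
  simp only [List.map_map, Function.comp_def, PySem.Dict.getD_counter]
  -- rewrite the innermost c,d sums with pv_inner_count
  have hA : (R.map (fun a => (R.map (fun b => (R.map (fun c =>
        ((R.countP (fun d => a * b - c * d == 1) : Nat) : Int))).sum)).sum)).sum
      = (P.map (fun p => ((P.count (p - 1) : Nat) : Int))).sum := by
    rw [← pv_nested_sum R (fun p => ((P.count (p - 1) : Nat) : Int))]
    congr 1
    apply List.map_congr_left
    intro a _
    congr 1
    apply List.map_congr_left
    intro b _
    exact pv_inner_count R (a * b)
  rw [hA]
  exact pv_group_sum (PySem.Set.ofList P) P (fun p => ((P.count (p - 1) : Nat) : Int))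
    (PySem.Set.nodup_ofList P) (fun x hx => (PySem.Set.mem_ofList P x).mpr hx)

-- ===== VERDICT (by name: the statement is the Claim_ definition above) =====
theorem cardinal_confusion_spec : Claim_equal_cardinal_confusion := by
  intro inp _
  exact cardinal_confusion_eq inp
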